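-- pv_equiv track=rewrite | github.com/octave-commons/fork_tales | part64/code/world_web/chamber.py | _partition_open_questions
-- ===== SOURCE A (Python) =====
-- def _partition_open_questions(
--     open_questions: list[dict[str, str]],
--     receipt_refs: list[str],
-- ) -> tuple[list[dict[str, str]], list[dict[str, str]]]:
--     resolved: list[dict[str, str]] = []
--     unresolved: list[dict[str, str]] = []
--     refs_text = "\n".join(receipt_refs)
--     for item in open_questions:
--         question_id = str(item.get("id", "")).strip()
--         if question_id and question_id in refs_text:
--             resolved.append(item)
--         else:
--             unresolved.append(item)
--     return resolved, unresolved
-- ===== SOURCE B (Python) =====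
-- def _partition_open_questions(open_questions, receipt_refs):
--     # Memoize the substring verdict per distinct stripped id, then partition
--     # by two comprehensions instead of a single append-loop.
--     refs_text = "\n".join(receipt_refs)
--     verdict = {}
--     for item in open_questions:
--         q = str(item.get("id", "")).strip()
--         if q not in verdict:
--             verdict[q] = bool(q) and q in refs_text
--     resolved = [item for item in open_questions
--                 if verdict[str(item.get("id", "")).strip()]]
--     unresolved = [item for item in open_questions
--                   if not verdict[str(item.get("id", "")).strip()]]
--     return resolved, unresolved
-- ===== Notes on version B (the rewrite author's own statement) =====
-- stated objective: alternative
-- what changed: B builds a memo dict of the substring verdict once per distinct stripped id (so duplicate ids cost one search) and then partitions by two list comprehensions, instead of A's single loop that re-searches refs_text for every item and appends to two accumulators.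
import Mathlib
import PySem

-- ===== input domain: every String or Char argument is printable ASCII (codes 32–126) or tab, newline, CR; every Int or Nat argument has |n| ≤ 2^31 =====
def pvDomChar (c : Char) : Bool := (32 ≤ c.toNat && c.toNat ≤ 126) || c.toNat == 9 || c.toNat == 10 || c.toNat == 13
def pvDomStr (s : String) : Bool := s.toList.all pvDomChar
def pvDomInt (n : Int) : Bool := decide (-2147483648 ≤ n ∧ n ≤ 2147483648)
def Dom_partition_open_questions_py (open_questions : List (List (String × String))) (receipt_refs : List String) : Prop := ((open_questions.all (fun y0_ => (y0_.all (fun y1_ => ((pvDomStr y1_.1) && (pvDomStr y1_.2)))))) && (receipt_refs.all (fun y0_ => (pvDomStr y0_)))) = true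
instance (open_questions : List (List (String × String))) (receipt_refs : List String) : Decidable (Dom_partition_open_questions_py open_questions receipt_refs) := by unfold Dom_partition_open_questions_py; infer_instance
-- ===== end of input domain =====

-- ===== PORT A =====
-- B memoizes the substring verdict per distinct stripped id and partitions by two filters,
-- instead of A's per-item re-search with two append-accumulators (objective: alternative).
def partition_open_questions_py (open_questions : List (List (String × String))) (receipt_refs : List String) : (List (List (String × String))) × (List (List (String × String))) :=
  let refs_text := PySem.Str.join "\n" receipt_refs
  open_questions.foldl
    (fun s item =>
      let question_id := PySem.Str.strip ((PySem.Dict.mk item).getD "id" "")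
      if (!(question_id == "") && PySem.Str.isIn question_id refs_text) then
        (s.1 ++ [item], s.2)
      else
        (s.1, s.2 ++ [item]))
    ([], [])

-- ===== PORT B =====
def partition_open_questions_py_alt (open_questions : List (List (String × String))) (receipt_refs : List String) : (List (List (String × String))) × (List (List (String × String))) :=
  let refs_text := PySem.Str.join "\n" receipt_refs
  let verdict : PySem.Dict String Bool := open_questions.foldl
    (fun d item =>
      let q := PySem.Str.strip ((PySem.Dict.mk item).getD "id" "")
      if d.contains q then d
      else d.insert q (!(q == "") && PySem.Str.isIn q refs_text))
    PySem.Dict.empty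
  -- verdict[...] lookup: the key is always present (inserted in the loop above); getD is exact here
  (open_questions.filter (fun item => verdict.getD (PySem.Str.strip ((PySem.Dict.mk item).getD "id" "")) false),
   open_questions.filter (fun item => !(verdict.getD (PySem.Str.strip ((PySem.Dict.mk item).getD "id" "")) false)))

-- ===== PRECONDITION & SPEC =====
def Spec_partition_open_questions_py (open_questions : List (List (String × String))) (receipt_refs : List String) (out : (List (List (String × String))) × (List (List (String × String)))) : Prop := out = partition_open_questions_py_alt open_questions receipt_refs
instance (open_questions : List (List (String × String))) (receipt_refs : List String) (out : (List (List (String × String))) × (List (List (String × String)))) : Decidable (Spec_partition_open_questions_py open_questions receipt_refs out) := by unfold Spec_partition_open_questions_py; infer_instance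

-- ===== CLAIM (what is proved, stated in full; the proofs are below) =====
def Claim_equal_partition_open_questions_py : Prop := ∀ (open_questions : List (List (String × String))) (receipt_refs : List String), Dom_partition_open_questions_py open_questions receipt_refs → Spec_partition_open_questions_py open_questions receipt_refs (partition_open_questions_py open_questions receipt_refs)

-- ===== LEMMAS AND PROOFS =====

-- the memo-building step of B, abstracted over the key function and the verdict function
def pvMemoStep {α : Type} (key : α → String) (f : String → Bool)
    (d : PySem.Dict String Bool) (item : α) : PySem.Dict String Bool :=
  if d.contains (key item) then d else d.insert (key item) (f (key item))

theorem pvMemo_contains_mono {α : Type} (key : α → String) (f : String → Bool) :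
    ∀ (l : List α) (d : PySem.Dict String Bool) (k : String), d.contains k = true →
      (l.foldl (pvMemoStep key f) d).contains k = true := by
  intro l
  induction l with
  | nil => intro d k h; simpa using h
  | cons a t ih =>
    intro d k h
    simp only [List.foldl_cons]
    apply ih
    unfold pvMemoStep
    split
    · exact h
    · rw [PySem.Dict.contains_insert]
      simp [h]

theorem pvMemo_inv {α : Type} (key : α → String) (f : String → Bool) :
    ∀ (l : List α) (d : PySem.Dict String Bool),
      (∀ k, d.contains k = true → d.getD k false = f k) →
      (∀ k, (l.foldl (pvMemoStep key f) d).contains k = true →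
        (l.foldl (pvMemoStep key f) d).getD k false = f k) := by
  intro l
  induction l with
  | nil => intro d hd; simpa using hd
  | cons a t ih =>
    intro d hd
    simp only [List.foldl_cons]
    apply ih
    unfold pvMemoStep
    split
    · exact hd
    · rename_i hnc
      intro k hk
      rw [PySem.Dict.getD_insert]
      by_cases hkq : k = key a
      · simp [hkq]
      · rw [if_neg hkq]
        apply hd
        rw [PySem.Dict.contains_insert] at hk
        simpa [hkq] using hk

theorem pvMemo_mem_contains {α : Type} (key : α → String) (f : String → Bool) :
    ∀ (l : List α) (d : PySem.Dict String Bool) (a : α), a ∈ l →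
      (l.foldl (pvMemoStep key f) d).contains (key a) = true := by
  intro l
  induction l with
  | nil => intro d a h; cases h
  | cons b t ih =>
    intro d a h
    simp only [List.foldl_cons]
    rcases List.mem_cons.mp h with rfl | hm
    · apply pvMemo_contains_mono
      unfold pvMemoStep
      split
      · assumption
      · exact PySem.Dict.contains_insert_self _ _ _
    · exact ih _ _ hm

theorem pvMemo_getD {α : Type} (key : α → String) (f : String → Bool)
    (l : List α) (a : α) (ha : a ∈ l) :
    (l.foldl (pvMemoStep key f) PySem.Dict.empty).getD (key a) false = f (key a) := by
  apply pvMemo_inv key f l PySem.Dict.empty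
  · intro k hk
    rw [PySem.Dict.contains_empty] at hk
    cases hk
  · exact pvMemo_mem_contains key f l PySem.Dict.empty a ha

-- A's two-accumulator loop is the pair of filters
theorem pvPartition_foldl_eq_filter {α : Type} (p : α → Bool) (l : List α) :
    l.foldl (fun s item => if p item then (s.1 ++ [item], s.2) else (s.1, s.2 ++ [item]))
      (([] : List α), ([] : List α))
      = (l.filter p, l.filter (fun x => !p x)) := by
  have hstep : (fun (s : List α × List α) item =>
      if p item then (s.1 ++ [item], s.2) else (s.1, s.2 ++ [item]))
      = fun s item => (if p item then s.1 ++ [item] else s.1,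
                       if !p item then s.2 ++ [item] else s.2) := by
    funext s item
    cases h : p item <;> simp
  rw [hstep]
  rw [PySem.List.foldl_prod_mk
        (f := fun acc item => if p item then acc ++ [item] else acc)
        (g := fun acc item => if !p item then acc ++ [item] else acc)]
  rw [PySem.List.foldl_append_if_eq_filter, PySem.List.foldl_append_if_eq_filter]
  simp

-- ===== VERDICT (by name: the statement is the Claim_ definition above) =====
theorem partition_open_questions_py_spec : Claim_equal_partition_open_questions_py := by
  intro open_questions receipt_refs _
  unfold Spec_partition_open_questions_py partition_open_questions_py partition_open_questions_py_alt
  set refs_text := PySem.Str.join "\n" receipt_refs with hrt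
  set key : List (String × String) → String :=
    fun item => PySem.Str.strip ((PySem.Dict.mk item).getD "id" "") with hkey
  set f : String → Bool := fun q => (!(q == "") && PySem.Str.isIn q refs_text) with hf
  have hA : open_questions.foldl
      (fun s item =>
        let question_id := key item
        if (!(question_id == "") && PySem.Str.isIn question_id refs_text) then
          (s.1 ++ [item], s.2)
        else (s.1, s.2 ++ [item])) ([], [])
      = (open_questions.filter (fun item => f (key item)),
         open_questions.filter (fun item => !f (key item))) :=
    pvPartition_foldl_eq_filter (fun item => f (key item)) open_questions
  rw [hA]
  show _ = (open_questions.filter (fun item =>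
      (open_questions.foldl (pvMemoStep key f) PySem.Dict.empty).getD (key item) false),
    open_questions.filter (fun item =>
      !(open_questions.foldl (pvMemoStep key f) PySem.Dict.empty).getD (key item) false))
  refine Prod.ext ?_ ?_ <;>
  · simp only []
    apply List.filter_congr
    intro a ha
    rw [pvMemo_getD key f open_questions a ha]
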